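-- pv_equiv track=rewrite | github.com/ZebraForce9/Ex8 | nonogram.py | is_legal_row
-- ===== SOURCE A (Python) =====
-- from typing import List, Tuple, Optional
--
-- def is_legal_row(row: List[int], blocks: List[int]) -> bool:
--     """
--     Check if the largest colored block in the row is not bigger than the largest block in the constraints.
--     """
--     if blocks:
--         largest_block = max(blocks)
--         count = 0
--
--         for square in row:
--             if square == 1:
--                 count += 1
--                 if count > largest_block:
--                     return False
--             else:
--                 count = 0
--     return True
-- ===== SOURCE B (Python) =====
-- def is_legal_row(row, blocks):
--     """Build the maximal runs of colored squares explicitly, then check each run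
--     against the largest constraint block."""
--     if not blocks:
--         return True
--     largest = max(blocks)
--     runs = []
--     i, n = 0, len(row)
--     while i < n:
--         if row[i] == 1:
--             j = i
--             while j < n and row[j] == 1:
--                 j += 1
--             runs.append(j - i)
--             i = j
--         else:
--             i += 1
--     return all(r <= largest for r in runs)
-- ===== Notes on version B (the rewrite author's own statement) =====
-- stated objective: alternative
-- what changed: B materialises the maximal runs of colored squares (an inner scan per run) and then checks all run lengths against max(blocks), instead of A's single counter with an early return.
import Mathlib
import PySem

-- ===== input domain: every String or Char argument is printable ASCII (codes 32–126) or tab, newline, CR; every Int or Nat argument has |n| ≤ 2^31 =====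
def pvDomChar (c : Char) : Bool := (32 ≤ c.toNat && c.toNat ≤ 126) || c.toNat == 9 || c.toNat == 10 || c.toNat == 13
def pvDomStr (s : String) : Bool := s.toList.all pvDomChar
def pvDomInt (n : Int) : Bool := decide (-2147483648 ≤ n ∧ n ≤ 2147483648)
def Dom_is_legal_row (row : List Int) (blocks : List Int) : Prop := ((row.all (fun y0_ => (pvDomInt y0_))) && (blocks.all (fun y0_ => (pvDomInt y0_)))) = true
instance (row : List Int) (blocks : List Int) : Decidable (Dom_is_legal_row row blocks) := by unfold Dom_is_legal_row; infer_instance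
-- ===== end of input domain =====

-- B tracks the same answer by a different decomposition: it first builds the list of
-- maximal colored-run lengths, then checks all of them against max(blocks); A keeps a
-- running counter with an early return. Equal on all inputs (both are total).

-- ===== PORT A =====
-- the for-loop of A: state is the running count; early 'return False' is the 'false' branch
def loopA (largest : Int) : List Int → Int → Bool
  | [], _ => true
  | square :: rest, count =>
    if square = 1 then
      if count + 1 > largest then false
      else loopA largest rest (count + 1)
    else loopA largest rest 0

def is_legal_row (row : List Int) (blocks : List Int) : Bool :=
  if blocks.isEmpty then true
  else
    let largest_block := (PySem.List.max? blocks (fun y => y)).getD 0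
    loopA largest_block row 0

-- ===== PORT B =====
-- inner while loop of B: length of the leading run of 1s, and the remainder
def span1 : List Int → Int × List Int
  | [] => (0, [])
  | x :: xs => if x = 1 then let p := span1 xs; (p.1 + 1, p.2) else (0, x :: xs)

theorem span1_len : ∀ l : List Int, (span1 l).2.length ≤ l.length
  | [] => le_refl _
  | x :: xs => by
    simp only [span1]
    split
    · exact le_trans (span1_len xs) (Nat.le_succ _)
    · exact le_refl _

-- outer while loop of B: collect the lengths of all maximal runs of 1s
def runsB : List Int → List Int
  | [] => []
  | x :: xs =>
    if x = 1 then ((span1 xs).1 + 1) :: runsB (span1 xs).2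
    else runsB xs
termination_by l => l.length
decreasing_by
  · exact Nat.lt_succ_of_le (span1_len xs)
  · exact Nat.lt_succ_of_le (le_refl _)

def is_legal_row_alt (row : List Int) (blocks : List Int) : Bool :=
  if blocks.isEmpty then true
  else
    let largest := (PySem.List.max? blocks (fun y => y)).getD 0
    (runsB row).all (fun r => decide (r ≤ largest))

-- ===== PRECONDITION & SPEC =====
def Spec_is_legal_row (row : List Int) (blocks : List Int) (out : Bool) : Prop := out = is_legal_row_alt row blocks
instance (row : List Int) (blocks : List Int) (out : Bool) : Decidable (Spec_is_legal_row row blocks out) := by unfold Spec_is_legal_row; infer_instance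

-- ===== CLAIM (what is proved, stated in full; the proofs are below) =====
def Claim_equal_is_legal_row : Prop := ∀ (row : List Int) (blocks : List Int), Dom_is_legal_row row blocks → Spec_is_legal_row row blocks (is_legal_row row blocks)

-- ===== LEMMAS AND PROOFS =====

theorem span1_fst_nonneg : ∀ l : List Int, 0 ≤ (span1 l).1
  | [] => le_refl _
  | x :: xs => by
    simp only [span1]
    split
    · have := span1_fst_nonneg xs; omega
    · exact le_refl _

-- consuming one run: A's counter over a list equals the run-length check plus a reset loop
theorem loopA_span (m : Int) : ∀ (l : List Int) (count : Int), count ≤ m →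
    loopA m l count = (decide (count + (span1 l).1 ≤ m) && loopA m (span1 l).2 0)
  | [], count, h => by simp [loopA, span1, h]
  | x :: xs, count, h => by
    by_cases hx : x = 1
    · simp only [loopA, span1, hx, if_pos]
      by_cases hgt : count + 1 > m
      · have hn := span1_fst_nonneg xs
        have : ¬ (count + ((span1 xs).1 + 1) ≤ m) := by omega
        simp only [this, decide_false, Bool.false_and, if_pos hgt]
      · have h1 : count + 1 ≤ m := by omega
        rw [if_neg hgt, loopA_span m xs (count + 1) h1]
        have : (count + ((span1 xs).1 + 1) ≤ m) ↔ (count + 1 + (span1 xs).1 ≤ m) := by omega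
        simp [this]
    · simp only [loopA, span1, if_neg hx]
      simp [h]

-- the main loop invariant: A's loop from count 0 equals B's all-runs check
theorem loopA_eq_runsB (m : Int) : ∀ l : List Int,
    loopA m l 0 = (runsB l).all (fun r => decide (r ≤ m))
  | [] => by simp [loopA, runsB]
  | x :: xs => by
    by_cases hx : x = 1
    · subst hx
      have hA : loopA m (1 :: xs) 0 = if (0:Int) + 1 > m then false else loopA m xs (0 + 1) := by
        simp [loopA]
      have hB : runsB (1 :: xs) = ((span1 xs).1 + 1) :: runsB (span1 xs).2 := by
        simp [runsB]
      rw [hA, hB]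
      by_cases hgt : (0 : Int) + 1 > m
      · have hn := span1_fst_nonneg xs
        have : ¬ ((span1 xs).1 + 1 ≤ m) := by omega
        rw [if_pos hgt]
        simp [this]
      · rw [if_neg hgt, show (0:Int) + 1 = 1 from by ring,
            loopA_span m xs 1 (by omega), loopA_eq_runsB m (span1 xs).2]
        have : (1 + (span1 xs).1 ≤ m) ↔ ((span1 xs).1 + 1 ≤ m) := by omega
        simp [this]
    · simp only [loopA, runsB, if_neg hx]
      exact loopA_eq_runsB m xs
  termination_by l => l.length
  decreasing_by
  · exact Nat.lt_succ_of_le (span1_len xs)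
  · exact Nat.lt_succ_of_le (le_refl _)

-- ===== VERDICT (by name: the statement is the Claim_ definition above) =====
theorem is_legal_row_spec : Claim_equal_is_legal_row := by
  intro row blocks _
  unfold Spec_is_legal_row is_legal_row is_legal_row_alt
  by_cases hb : blocks.isEmpty
  · simp [hb]
  · simp only [hb]
    exact loopA_eq_runsB _ row
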